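-- pv_equiv track=rewrite | github.com/MaxeonY/infraredSR_Exp_Framework | models/edsr_arf.py | _build_layer_channel_schedule
-- ===== SOURCE A (Python) =====
-- from typing import Dict, List, Optional, Sequence, Tuple
--
-- def _build_layer_channel_schedule(
--     scale: int,
--     n_resblocks: int,
--     n_feats: int,
--     out_channels: int,
-- ) -> List[int]:
--     channels: List[int] = [n_feats]
--     for _ in range(n_resblocks):
--         channels.extend([n_feats, n_feats])
--     channels.append(n_feats)
--
--     upsample_count = 1 if scale == 2 else 2
--     channels.extend([n_feats * 4] * upsample_count)
--     channels.append(out_channels)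
--     return channels
-- ===== SOURCE B (Python) =====
-- def _build_layer_channel_schedule(
--     scale: int,
--     n_resblocks: int,
--     n_feats: int,
--     out_channels: int,
-- ) -> list:
--     body = 2 * max(n_resblocks, 0) + 2
--     upsample = 1 if scale == 2 else 2
--     total = body + upsample + 1
--
--     def channel_at(i: int) -> int:
--         if i < body:
--             return n_feats
--         if i < body + upsample:
--             return n_feats * 4
--         return out_channels
--
--     return [channel_at(i) for i in range(total)]
-- ===== Notes on version B (the rewrite author's own statement) =====
-- stated objective: alternative
-- what changed: Replaces A's accumulation by repeated extend/append with a positional formula: B computes the total length and maps a pure index->channel function over range(total), so no list is grown incrementally.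
import Mathlib
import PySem

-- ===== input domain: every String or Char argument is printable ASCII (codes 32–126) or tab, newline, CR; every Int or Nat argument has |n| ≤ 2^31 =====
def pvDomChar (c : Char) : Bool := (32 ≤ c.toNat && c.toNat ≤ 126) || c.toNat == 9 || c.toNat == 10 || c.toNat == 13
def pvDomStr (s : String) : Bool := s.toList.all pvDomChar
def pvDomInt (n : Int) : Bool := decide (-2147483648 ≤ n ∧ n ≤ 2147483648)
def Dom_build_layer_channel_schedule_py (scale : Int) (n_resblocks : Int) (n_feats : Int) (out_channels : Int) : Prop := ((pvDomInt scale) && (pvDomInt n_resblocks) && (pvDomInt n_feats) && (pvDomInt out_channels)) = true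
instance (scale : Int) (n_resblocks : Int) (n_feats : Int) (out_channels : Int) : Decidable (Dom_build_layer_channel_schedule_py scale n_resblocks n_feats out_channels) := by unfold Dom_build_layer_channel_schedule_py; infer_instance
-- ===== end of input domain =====

-- B replaces A's incremental extend/append accumulation with a positional formula:
-- it computes the total length and maps a pure index→channel function over the index range.

-- ===== PORT A =====
-- literal port of A: start with [n_feats], loop over range(n_resblocks) extending by
-- [n_feats, n_feats], append n_feats, extend by [n_feats*4]*upsample_count, append out_channels
def build_layer_channel_schedule_py (scale : Int) (n_resblocks : Int) (n_feats : Int) (out_channels : Int) : List Int :=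
  let channels : List Int := [n_feats]
  let channels := (PySem.List.pyRange 0 n_resblocks 1).foldl
    (fun acc _ => acc ++ [n_feats, n_feats]) channels
  let channels := channels ++ [n_feats]
  let upsample_count : Nat := if scale == 2 then 1 else 2
  let channels := channels ++ List.replicate upsample_count (n_feats * 4)
  channels ++ [out_channels]

-- ===== PORT B =====
-- port of Source B: total length computed up front; list produced by mapping the
-- index→channel function channel_at over range(total)
def build_layer_channel_schedule_py_alt (scale : Int) (n_resblocks : Int) (n_feats : Int) (out_channels : Int) : List Int :=
  let body : Nat := 2 * (max n_resblocks 0).toNat + 2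
  let upsample : Nat := if scale == 2 then 1 else 2
  let total : Nat := body + upsample + 1
  let channel_at : Nat → Int := fun i =>
    if i < body then n_feats
    else if i < body + upsample then n_feats * 4
    else out_channels
  (List.range total).map channel_at

-- ===== PRECONDITION & SPEC =====
def Spec_build_layer_channel_schedule_py (scale : Int) (n_resblocks : Int) (n_feats : Int) (out_channels : Int) (out : List Int) : Prop := out = build_layer_channel_schedule_py_alt scale n_resblocks n_feats out_channels
instance (scale : Int) (n_resblocks : Int) (n_feats : Int) (out_channels : Int) (out : List Int) : Decidable (Spec_build_layer_channel_schedule_py scale n_resblocks n_feats out_channels out) := by unfold Spec_build_layer_channel_schedule_py; infer_instance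

-- ===== CLAIM (what is proved, stated in full; the proofs are below) =====
def Claim_equal_build_layer_channel_schedule_py : Prop := ∀ (scale : Int) (n_resblocks : Int) (n_feats : Int) (out_channels : Int), Dom_build_layer_channel_schedule_py scale n_resblocks n_feats out_channels → Spec_build_layer_channel_schedule_py scale n_resblocks n_feats out_channels (build_layer_channel_schedule_py scale n_resblocks n_feats out_channels)

-- ===== LEMMAS AND PROOFS =====

-- folding a constant two-element extension over any list appends 2·length copies
lemma foldl_extend_pair (f : Int) (l : List Int) (init : List Int) :
    l.foldl (fun acc (_ : Int) => acc ++ [f, f]) init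
      = init ++ List.replicate (2 * l.length) f := by
  induction l generalizing init with
  | nil => simp
  | cons x xs ih =>
      simp only [List.foldl_cons, ih, List.length_cons]
      rw [show 2 * (xs.length + 1) = 2 + 2 * xs.length from by ring, List.replicate_add,
        ← List.append_assoc]
      rfl

lemma replicate_shape (n : Nat) (f : Int) (rest : List Int) :
    f :: (List.replicate (2 * n) f ++ f :: rest) = List.replicate (2 * n + 2) f ++ rest := by
  rw [show 2 * n + 2 = (2 * n + 1) + 1 from rfl, List.replicate_succ, List.replicate_succ']
  simp

-- mapping a three-segment positional function over the index range yields the segmented list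
lemma range_map_three (a b : Nat) (x y z : Int) :
    (List.range (a + b + 1)).map
      (fun i => if i < a then x else if i < a + b then y else z)
      = List.replicate a x ++ (List.replicate b y ++ [z]) := by
  apply List.ext_getElem
  · simp; omega
  · intro i h1 h2
    simp only [List.getElem_map, List.getElem_range]
    by_cases hia : i < a
    · rw [List.getElem_append_left (by simpa using hia)]
      simp [hia]
    · rw [List.getElem_append_right (by simpa using hia)]
      by_cases hib : i < a + b
      · rw [List.getElem_append_left (by simp; omega)]
        simp [hia, hib]
      · rw [List.getElem_append_right (by simp; omega)]
        simp [hia, hib]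

-- ===== VERDICT (by name: the statement is the Claim_ definition above) =====
theorem build_layer_channel_schedule_py_spec : Claim_equal_build_layer_channel_schedule_py := by
  intro scale n_resblocks n_feats out_channels _
  show _ = _
  unfold build_layer_channel_schedule_py build_layer_channel_schedule_py_alt
  simp only [foldl_extend_pair, PySem.List.length_pyRange_one, range_map_three]
  have hlen : (n_resblocks - 0).toNat = (max n_resblocks 0).toNat := by omega
  rw [hlen]
  simp only [List.cons_append, List.nil_append, List.append_assoc]
  rw [replicate_shape]
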